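-- pv_equiv track=rewrite | github.com/sapienzastudents/exercises | Progettazione di Algoritmi/canale2/2018_2019/esercizi/programmazione_dinamica/strategia_vincente_monete.py | es8
-- ===== SOURCE A (Python) =====
-- def es8(n):
--     if n < 5: # Casi base
--         return True if n != 1 and n != 3 else False
--
--     strategia_vincente = [False for _ in range(n + 1)]
--
--     strategia_vincente[0] = True
--     strategia_vincente[2] = True
--     strategia_vincente[4] = True
--
--     for i in range(5, n + 1):
--         strategia_vincente[i] = not strategia_vincente[i - 1] \
--                                 or not strategia_vincente[i - 3] \
--                                 or not strategia_vincente[i - 4]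
--
--     return strategia_vincente[n]
-- ===== SOURCE B (Python) =====
-- def es8(n):
--     # The DP recurrence f(i) = not f(i-1) or not f(i-3) or not f(i-4)
--     # with f(0)=f(2)=f(4)=True, f(1)=f(3)=False is periodic with period 7
--     # from n = 0: losing positions are exactly n % 7 in {1, 3}.
--     return n < 0 or n % 7 not in (1, 3)
-- ===== Notes on version B (the rewrite author's own statement) =====
-- stated objective: faster
-- what changed: Replaced the O(n) dynamic-programming table with the closed form n % 7 not in (1, 3), using the proved period-7 behaviour of the 4-term boolean recurrence.
import Mathlib
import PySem

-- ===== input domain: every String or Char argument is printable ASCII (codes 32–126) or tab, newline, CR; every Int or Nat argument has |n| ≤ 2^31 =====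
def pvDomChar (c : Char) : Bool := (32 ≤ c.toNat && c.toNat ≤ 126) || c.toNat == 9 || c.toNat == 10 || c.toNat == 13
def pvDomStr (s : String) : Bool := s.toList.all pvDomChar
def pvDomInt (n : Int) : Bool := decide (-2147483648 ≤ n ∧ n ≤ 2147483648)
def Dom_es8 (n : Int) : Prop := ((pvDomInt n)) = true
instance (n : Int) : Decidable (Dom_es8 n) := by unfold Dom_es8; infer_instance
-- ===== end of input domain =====

-- B is the O(1) closed form of A's O(n) DP: the recurrence is periodic with period 7.

-- ===== PORT A =====
-- Literal port of A's DP: build the (n+1)-entry table, seed indices 0,2,4,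
-- then fill indices 5..n left to right; all list indices are in range, so
-- Python's l[i] is List.getD (exact here).
def es8 (n : Int) : Bool :=
  if n < 5 then
    if n ≠ 1 ∧ n ≠ 3 then true else false
  else
    let m := n.toNat
    let sv := (((List.replicate (m + 1) false).set 0 true).set 2 true).set 4 true
    let sv := (List.range' 5 (m - 4)).foldl
      (fun l i =>
        l.set i (!(l.getD (i - 1) false) || !(l.getD (i - 3) false) || !(l.getD (i - 4) false))) sv
    sv.getD m false

-- ===== PORT B =====
def es8_alt (n : Int) : Bool :=
  decide (n < 0) || !(PySem.Int.mod n 7 == 1 || PySem.Int.mod n 7 == 3)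

-- ===== PRECONDITION & SPEC =====
def Spec_es8 (n : Int) (out : Bool) : Prop := out = es8_alt n
instance (n : Int) (out : Bool) : Decidable (Spec_es8 n out) := by unfold Spec_es8; infer_instance

-- ===== CLAIM (what is proved, stated in full; the proofs are below) =====
def Claim_equal_es8 : Prop := ∀ (n : Int), Dom_es8 n → Spec_es8 n (es8 n)

-- ===== LEMMAS AND PROOFS =====

-- the DP sequence, as a recurrence
def gDP : Nat → Bool
  | 0 => true
  | 1 => false
  | 2 => true
  | 3 => false
  | 4 => true
  | (k + 5) => !gDP (k + 4) || !gDP (k + 2) || !gDP (k + 1)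

-- the closed-form pattern
def pat (r : Nat) : Bool := !(r == 1 || r == 3)

lemma gDP_pat : ∀ k : Nat,
    gDP k = pat (k % 7) ∧ gDP (k+1) = pat ((k+1) % 7) ∧ gDP (k+2) = pat ((k+2) % 7) ∧
    gDP (k+3) = pat ((k+3) % 7) ∧ gDP (k+4) = pat ((k+4) % 7) := by
  intro k
  induction k with
  | zero => decide
  | succ k ih =>
    obtain ⟨_, h1, h2, h3, h4⟩ := ih
    refine ⟨h1, h2, h3, h4, ?_⟩
    show gDP (k + 5) = pat ((k + 5) % 7)
    have e : gDP (k + 5) = (!gDP (k + 4) || !gDP (k + 2) || !gDP (k + 1)) := rfl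
    rw [e, h4, h2, h1]
    have m1 : (k + 1) % 7 = (k % 7 + 1) % 7 := by omega
    have m2 : (k + 2) % 7 = (k % 7 + 2) % 7 := by omega
    have m4 : (k + 4) % 7 = (k % 7 + 4) % 7 := by omega
    have m5 : (k + 5) % 7 = (k % 7 + 5) % 7 := by omega
    rw [m1, m2, m4, m5]
    have hr : k % 7 < 7 := Nat.mod_lt _ (by norm_num)
    interval_cases (k % 7) <;> decide

def stepDP (l : List Bool) (i : Nat) : List Bool :=
  l.set i (!(l.getD (i - 1) false) || !(l.getD (i - 3) false) || !(l.getD (i - 4) false))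

def seedDP (m : Nat) : List Bool :=
  (((List.replicate (m + 1) false).set 0 true).set 2 true).set 4 true

lemma seedDP_length (m : Nat) : (seedDP m).length = m + 1 := by
  simp [seedDP]

lemma seedDP_getD (m : Nat) (hm : 5 ≤ m) (k : Nat) (hk : k ≤ 4) :
    (seedDP m).getD k false = gDP k := by
  have h6 : m + 1 = 6 + (m - 5) := by omega
  unfold seedDP
  rw [h6, List.replicate_add]
  interval_cases k <;> simp [List.replicate, List.getD, gDP]

-- loop invariant: after processing range' 5 c, entries 0..4+c hold gDP and the length is m+1
lemma foldDP_invariant (m : Nat) (hm : 5 ≤ m) : ∀ c, c ≤ m - 4 →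
    ((List.range' 5 c).foldl stepDP (seedDP m)).length = m + 1 ∧
    ∀ k, k ≤ 4 + c → ((List.range' 5 c).foldl stepDP (seedDP m)).getD k false = gDP k := by
  intro c
  induction c with
  | zero =>
    intro _
    exact ⟨seedDP_length m, fun k hk => seedDP_getD m hm k hk⟩
  | succ c ih =>
    intro hc
    obtain ⟨hlen, hval⟩ := ih (by omega)
    rw [List.range'_concat, List.foldl_append]
    simp only [one_mul]
    set R := (List.range' 5 c).foldl stepDP (seedDP m) with hR
    simp only [List.foldl_cons, List.foldl_nil]
    have hi : 5 + c ≤ m := by omega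
    have hlen' : (stepDP R (5 + c)).length = m + 1 := by
      simp [stepDP, hlen]
    refine ⟨hlen', ?_⟩
    intro k hk
    have hget : ∀ j, j ≤ 4 + c → (stepDP R (5 + c)).getD j false = gDP j := by
      intro j hj
      have : 5 + c ≠ j := by omega
      simp only [stepDP, List.getD, List.getElem?_set_ne this]
      exact hval j hj
    rcases Nat.lt_or_ge k (5 + c) with hlt | hge
    · exact hget k (by omega)
    · have hk5 : k = 5 + c := by omega
      subst hk5
      have e1 : 5 + c - 1 = c + 4 := by omega
      have e3 : 5 + c - 3 = c + 2 := by omega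
      have e4 : 5 + c - 4 = c + 1 := by omega
      have hv : stepDP R (5 + c) =
          R.set (5 + c) (!gDP (c + 4) || !gDP (c + 2) || !gDP (c + 1)) := by
        unfold stepDP
        rw [e1, e3, e4, hval (c + 4) (by omega), hval (c + 2) (by omega),
            hval (c + 1) (by omega)]
      rw [hv]
      have hlt' : 5 + c < R.length := by omega
      simp only [List.getD, List.getElem?_set_self' ]
      simp [hlt', show gDP (5 + c) = (!gDP (c + 4) || !gDP (c + 2) || !gDP (c + 1)) by
        have : 5 + c = c + 5 := by omega
        rw [this]; rfl]

lemma es8_eq_pat (n : Int) (hn : 5 ≤ n) : es8 n = pat (n.toNat % 7) := by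
  have h5 : ¬ n < 5 := by omega
  have hm : 5 ≤ n.toNat := by omega
  unfold es8
  rw [if_neg h5]
  have hfold := (foldDP_invariant n.toNat hm (n.toNat - 4) le_rfl).2 n.toNat (by omega)
  show ((List.range' 5 (n.toNat - 4)).foldl stepDP (seedDP n.toNat)).getD n.toNat false
      = pat (n.toNat % 7)
  rw [hfold]
  exact (gDP_pat n.toNat).1

-- ===== VERDICT (by name: the statement is the Claim_ definition above) =====
theorem es8_spec : Claim_equal_es8 := by
  intro n _
  show es8 n = es8_alt n
  rcases Int.lt_or_le n 0 with hneg | hpos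
  · have h5 : n < 5 := by omega
    have h1 : n ≠ 1 := by omega
    have h3 : n ≠ 3 := by omega
    simp [es8, es8_alt, h5, h1, h3, hneg]
  · have hmod : PySem.Int.mod n 7 = ((n.toNat % 7 : Nat) : Int) := by
      rw [show n = ((n.toNat : Nat) : Int) by omega]
      exact_mod_cast PySem.Int.mod_natCast n.toNat 7
    have hnneg : ¬ n < 0 := by omega
    rcases Int.lt_or_le n 5 with h5 | h5
    · have : n = 0 ∨ n = 1 ∨ n = 2 ∨ n = 3 ∨ n = 4 := by omega
      rcases this with h | h | h | h | h <;> subst h <;> decide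
    · rw [es8_eq_pat n h5]
      simp only [es8_alt, hmod, hnneg, decide_false, Bool.false_or]
      unfold pat
      congr 1
      have hlt : n.toNat % 7 < 7 := Nat.mod_lt _ (by norm_num)
      interval_cases (n.toNat % 7) <;> simp
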